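-- pv_equiv track=rewrite | github.com/ltlkong/algoorithm | others/maze.py | checkRoadAvaliable
-- ===== SOURCE A (Python) =====
-- def checkRoadAvaliable(position, mazeList):
--     next = [-1,-1]
--     # Mark the road traveled
--     mazeList[position[0]][position[1]] = 5
--
--     for i in range(4):
--         diffX = 0
--         diffY = 0
--
--         if i == 0: diffX = 1
--         if i == 1: diffX = -1
--         if i == 2: diffY = 1
--         if i == 3: diffY = -1
--
--         if 0 <= position[0]+diffY < len(mazeList) and 0<= position[1]+diffX < len(mazeList[position[0]]) and mazeList[position[0] + diffY][position[1] + diffX] not in [1 ,4, 5]: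
--             next = [position[0] + diffY,position[1] + diffX]
--
--             if mazeList[next[0]][next[1]] == 2:
--                 return next
--
--     return next
-- ===== SOURCE B (Python) =====
-- # Same return value and same in-place mutation mazeList[position[0]][position[1]] = 5 as A;
-- # recursive search over an explicit delta list instead of A's indexed loop with diff arithmetic.
-- def _probe(position, mazeList, deltas, rows, cols, last):
--     if not deltas:
--         return [-1, -1] if last is None else last
--     dy, dx = deltas[0]
--     y = position[0] + dy
--     x = position[1] + dx
--     if 0 <= y < rows and 0 <= x < cols and mazeList[y][x] not in (1, 4, 5):
--         if mazeList[y][x] == 2: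
--             return [y, x]
--         return _probe(position, mazeList, deltas[1:], rows, cols, [y, x])
--     return _probe(position, mazeList, deltas[1:], rows, cols, last)
--
-- def checkRoadAvaliable(position, mazeList):
--     mazeList[position[0]][position[1]] = 5
--     return _probe(position, mazeList, [(0, 1), (0, -1), (1, 0), (-1, 0)],
--                   len(mazeList), len(mazeList[position[0]]), None)
-- ===== Notes on version B (the rewrite author's own statement) =====
-- stated objective: alternative
-- what changed: Replaces A's indexed range(4) loop that decodes each index into diffX/diffY and threads a [-1,-1] sentinel by a recursive search over an explicit (dy,dx) delta list threading an Optional last-valid cell; reads and early exit happen in the same order, so A and B raise on exactly the same inputs.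
import Mathlib
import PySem

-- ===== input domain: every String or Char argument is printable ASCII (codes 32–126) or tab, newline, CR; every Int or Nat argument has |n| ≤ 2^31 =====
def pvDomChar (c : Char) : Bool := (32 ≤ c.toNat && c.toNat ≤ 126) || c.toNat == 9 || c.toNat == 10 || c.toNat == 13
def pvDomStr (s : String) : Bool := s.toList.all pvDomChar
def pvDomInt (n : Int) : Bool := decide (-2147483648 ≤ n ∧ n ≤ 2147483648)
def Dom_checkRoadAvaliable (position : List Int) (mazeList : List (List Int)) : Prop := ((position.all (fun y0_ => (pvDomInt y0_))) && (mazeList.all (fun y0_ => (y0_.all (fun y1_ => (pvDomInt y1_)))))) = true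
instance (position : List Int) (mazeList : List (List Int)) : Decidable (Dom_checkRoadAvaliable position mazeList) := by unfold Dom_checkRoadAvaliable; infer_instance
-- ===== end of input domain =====

-- B replaces A's indexed range(4) loop (index decoded into diffX/diffY, a [-1,-1] sentinel
-- accumulator) by a recursive search over an explicit (dy, dx) delta list threading an
-- Optional last-valid cell; reads and the early exit happen in the same order, so both
-- Pythons raise on exactly the same inputs.  Both Pythons mutate
-- mazeList[position[0]][position[1]] = 5 identically before any other read; the theorems
-- below are about the RETURN value, with that mutation modelled inside both ports as the
-- marked maze pvMark.

-- mazeList[y][x] (Python indexing; exact under Pre_, where every performed read is in range)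
def pvCell (m : List (List Int)) (y x : Int) : Int :=
  PySem.List.pyGetD (PySem.List.pyGetD m y []) x 0

-- the maze after the shared in-place mutation mazeList[position[0]][position[1]] = 5
def pvMark (position : List Int) (mazeList : List (List Int)) : List (List Int) :=
  let p0 := PySem.List.pyGetD position 0 0
  let p1 := PySem.List.pyGetD position 1 0
  PySem.List.pySetD mazeList p0 (PySem.List.pySetD (PySem.List.pyGetD mazeList p0 []) p1 5)

-- ===== PORT A =====
def pvLoopA (m : List (List Int)) (p0 p1 : Int) : List Int → List Int → List Int
  | next, [] => next
  | next, i :: rest =>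
    let diffX : Int := if i = 0 then 1 else if i = 1 then -1 else 0
    let diffY : Int := if i = 2 then 1 else if i = 3 then -1 else 0
    if 0 ≤ p0 + diffY ∧ p0 + diffY < (m.length : Int) ∧
       0 ≤ p1 + diffX ∧ p1 + diffX < ((PySem.List.pyGetD m p0 []).length : Int) ∧
       pvCell m (p0 + diffY) (p1 + diffX) ∉ ([1, 4, 5] : List Int) then
      if pvCell m (p0 + diffY) (p1 + diffX) = 2 then [p0 + diffY, p1 + diffX]
      else pvLoopA m p0 p1 [p0 + diffY, p1 + diffX] rest
    else pvLoopA m p0 p1 next rest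

def checkRoadAvaliable (position : List Int) (mazeList : List (List Int)) : List Int :=
  let p0 := PySem.List.pyGetD position 0 0
  let p1 := PySem.List.pyGetD position 1 0
  -- mazeList[position[0]][position[1]] = 5
  let m := pvMark position mazeList
  pvLoopA m p0 p1 [-1, -1] (PySem.List.pyRange 0 4 1)

-- ===== PORT B =====
def pvDeltas : List (Int × Int) := [(0, 1), (0, -1), (1, 0), (-1, 0)]

def pvProbe (position : List Int) (m : List (List Int)) (rows cols : Int) :
    List (Int × Int) → Option (List Int) → List Int
  | [], last => match last with | none => [-1, -1] | some c => c
  | d :: rest, last =>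
    let y := PySem.List.pyGetD position 0 0 + d.1
    let x := PySem.List.pyGetD position 1 0 + d.2
    if 0 ≤ y ∧ y < rows ∧ 0 ≤ x ∧ x < cols ∧ pvCell m y x ∉ ([1, 4, 5] : List Int) then
      if pvCell m y x = 2 then [y, x]
      else pvProbe position m rows cols rest (some [y, x])
    else pvProbe position m rows cols rest last

def checkRoadAvaliable_alt (position : List Int) (mazeList : List (List Int)) : List Int :=
  -- mazeList[position[0]][position[1]] = 5
  let m := pvMark position mazeList
  pvProbe position m (m.length : Int)
    ((PySem.List.pyGetD m (PySem.List.pyGetD position 0 0) []).length : Int) pvDeltas none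

-- ===== PRECONDITION & SPEC =====
-- Pre_ admits exactly the inputs on which the Python A (and B, which performs the identical
-- reads in the identical order) returns normally: position has the two entries read, the
-- mutated cell is in (wrap-around) range, and no neighbor read crashes before the loop
-- exits — a neighbor read at delta d crashes when d passes the bound check taken against
-- row position[0]'s length but row position[0]+dy is shorter; that is tolerated only if an
-- earlier delta already returned a cell valued 2.  (Finite closed form over the four deltas.)
abbrev pvBounds (position : List Int) (mazeList : List (List Int)) (d : Int × Int) : Prop :=
  0 ≤ PySem.List.pyGetD position 0 0 + d.1 ∧
  PySem.List.pyGetD position 0 0 + d.1 < ((pvMark position mazeList).length : Int) ∧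
  0 ≤ PySem.List.pyGetD position 1 0 + d.2 ∧
  PySem.List.pyGetD position 1 0 + d.2 <
    ((PySem.List.pyGetD (pvMark position mazeList) (PySem.List.pyGetD position 0 0) []).length : Int)

abbrev pvLng (position : List Int) (mazeList : List (List Int)) (d : Int × Int) : Prop :=
  PySem.List.pyGetD position 1 0 + d.2 <
    ((PySem.List.pyGetD (pvMark position mazeList) (PySem.List.pyGetD position 0 0 + d.1) []).length : Int)

-- the loop returns at delta d: in bounds, the row is long enough, and the cell holds a 2
abbrev pvHit (position : List Int) (mazeList : List (List Int)) (d : Int × Int) : Prop :=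
  pvBounds position mazeList d ∧ pvLng position mazeList d ∧
  pvCell (pvMark position mazeList) (PySem.List.pyGetD position 0 0 + d.1)
    (PySem.List.pyGetD position 1 0 + d.2) = 2

-- the read at delta d raises: in bounds against row position[0], but row position[0]+dy too short
abbrev pvBad (position : List Int) (mazeList : List (List Int)) (d : Int × Int) : Prop :=
  pvBounds position mazeList d ∧ ¬ pvLng position mazeList d

def Pre_checkRoadAvaliable (position : List Int) (mazeList : List (List Int)) : Prop :=
  (decide (2 ≤ position.length) &&
   decide (PySem.Raise.InRange mazeList.length (PySem.List.pyGetD position 0 0)) &&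
   decide (PySem.Raise.InRange
     (PySem.List.pyGetD mazeList (PySem.List.pyGetD position 0 0) []).length
     (PySem.List.pyGetD position 1 0)) &&
   !decide (pvBad position mazeList (0, 1)) &&
   (!decide (pvBad position mazeList (0, -1)) || decide (pvHit position mazeList (0, 1))) &&
   (!decide (pvBad position mazeList (1, 0)) || decide (pvHit position mazeList (0, 1)) ||
     decide (pvHit position mazeList (0, -1))) &&
   (!decide (pvBad position mazeList (-1, 0)) || decide (pvHit position mazeList (0, 1)) ||
     decide (pvHit position mazeList (0, -1)) || decide (pvHit position mazeList (1, 0)))) = true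

instance (position : List Int) (mazeList : List (List Int)) : Decidable (Pre_checkRoadAvaliable position mazeList) := by
  unfold Pre_checkRoadAvaliable; infer_instance

def pvWitness_checkRoadAvaliable : List Int × List (List Int) := ([0, 0], [[0, 2], [0, 0]])

def Spec_checkRoadAvaliable (position : List Int) (mazeList : List (List Int)) (out : List Int) : Prop := out = checkRoadAvaliable_alt position mazeList
instance (position : List Int) (mazeList : List (List Int)) (out : List Int) : Decidable (Spec_checkRoadAvaliable position mazeList out) := by unfold Spec_checkRoadAvaliable; infer_instance

-- ===== CLAIM (what is proved, stated in full; the proofs are below) =====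
def Claim_equal_checkRoadAvaliable : Prop := ∀ (position : List Int) (mazeList : List (List Int)), Dom_checkRoadAvaliable position mazeList → Pre_checkRoadAvaliable position mazeList → Spec_checkRoadAvaliable position mazeList (checkRoadAvaliable position mazeList)

-- ===== LEMMAS AND PROOFS =====
-- A's loop, rephrased over the (dy, dx) pairs its index arithmetic encodes
def pvLoopD (m : List (List Int)) (p0 p1 rows cols : Int) : List Int → List (Int × Int) → List Int
  | next, [] => next
  | next, d :: rest =>
    if 0 ≤ p0 + d.1 ∧ p0 + d.1 < rows ∧ 0 ≤ p1 + d.2 ∧ p1 + d.2 < cols ∧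
       pvCell m (p0 + d.1) (p1 + d.2) ∉ ([1, 4, 5] : List Int) then
      if pvCell m (p0 + d.1) (p1 + d.2) = 2 then [p0 + d.1, p1 + d.2]
      else pvLoopD m p0 p1 rows cols [p0 + d.1, p1 + d.2] rest
    else pvLoopD m p0 p1 rows cols next rest

lemma loopA_eq_loopD (m : List (List Int)) (p0 p1 : Int) (next : List Int) :
    pvLoopA m p0 p1 next (PySem.List.pyRange 0 4 1) =
      pvLoopD m p0 p1 (m.length : Int) ((PySem.List.pyGetD m p0 []).length : Int) next pvDeltas := by
  have hr : PySem.List.pyRange 0 4 1 = [0, 1, 2, 3] := by decide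
  rw [hr]
  simp only [pvLoopA, pvLoopD, pvDeltas]
  norm_num

lemma loopD_eq_probe (position : List Int) (m : List (List Int)) (rows cols : Int)
    (ds : List (Int × Int)) (last : Option (List Int)) :
    pvLoopD m (PySem.List.pyGetD position 0 0) (PySem.List.pyGetD position 1 0) rows cols
        (last.elim [-1, -1] id) ds =
      pvProbe position m rows cols ds last := by
  induction ds generalizing last with
  | nil => cases last <;> rfl
  | cons d rest ih =>
    simp only [pvLoopD, pvProbe]
    split_ifs with h h2
    · rfl
    · exact ih (some _)
    · exact ih last

lemma pv_eq (position : List Int) (mazeList : List (List Int)) :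
    checkRoadAvaliable position mazeList = checkRoadAvaliable_alt position mazeList := by
  unfold checkRoadAvaliable checkRoadAvaliable_alt
  rw [loopA_eq_loopD]
  exact loopD_eq_probe position (pvMark position mazeList) _ _ pvDeltas none

-- ===== VERDICT (by name: the statement is the Claim_ definition above) =====
theorem checkRoadAvaliable_spec : Claim_equal_checkRoadAvaliable := by
  intro position mazeList _ _
  unfold Spec_checkRoadAvaliable
  exact pv_eq position mazeList
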